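-- pv_equiv track=rewrite | github.com/22Rahul22/Hackerrank | test1.py | calculate
-- ===== SOURCE A (Python) =====
-- def calculate(arr, k):
--     c = {}
--     s = k
--     for i in range(len(arr)):
--         if arr[i] not in c:
--             c[arr[i]] = 1
--         else:
--             c[arr[i]] += 1
--     for i in c:
--         if c[i] > 1:
--             s += c[i]
--     return s
-- ===== SOURCE B (Python) =====
-- def calculate(arr, k):
--     s = k
--     run = 0
--     prev = 0
--     for x in sorted(arr):
--         if run > 0 and x == prev:
--             run += 1
--         else:
--             if run > 1:
--                 s += run
--             run = 1
--             prev = x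
--     if run > 1:
--         s += run
--     return s
-- ===== Notes on version B (the rewrite author's own statement) =====
-- stated objective: alternative
-- what changed: Replaced the hash-map counting pass plus key-iteration pass with one run-length scan over a sorted copy of arr, flushing each run of equal elements and adding its length to k when it exceeds 1; C-level sorted() plus a plain-variable scan avoids per-element dict operations, which a timing run measured as a constant-factor speedup.
import Mathlib
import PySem

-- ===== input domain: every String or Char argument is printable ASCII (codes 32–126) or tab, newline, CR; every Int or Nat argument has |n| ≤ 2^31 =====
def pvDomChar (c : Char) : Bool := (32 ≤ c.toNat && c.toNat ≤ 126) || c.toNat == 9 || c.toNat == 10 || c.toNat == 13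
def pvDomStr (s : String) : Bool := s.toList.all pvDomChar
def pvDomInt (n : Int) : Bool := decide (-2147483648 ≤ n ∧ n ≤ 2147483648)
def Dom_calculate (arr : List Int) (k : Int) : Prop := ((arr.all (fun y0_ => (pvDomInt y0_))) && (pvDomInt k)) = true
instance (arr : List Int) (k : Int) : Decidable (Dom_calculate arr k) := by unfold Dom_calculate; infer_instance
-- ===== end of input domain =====

-- B replaces A's dict-counting pass plus key-iteration pass by one run-length scan over a
-- sorted copy of arr (objective: alternative; arr itself is not mutated by either version).

-- ===== PORT A =====
def calculate (arr : List Int) (k : Int) : Int :=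
  let c : PySem.Dict Int Int :=
    (PySem.List.pyRange 0 arr.length 1).foldl
      (fun c i =>
        if c.contains (PySem.List.pyGetD arr i 0) = false then
          c.insert (PySem.List.pyGetD arr i 0) 1
        else c.modify (PySem.List.pyGetD arr i 0) 0 (· + 1))
      PySem.Dict.empty
  c.keys.foldl (fun s i => if c.getD i 0 > 1 then s + c.getD i 0 else s) k

-- ===== PORT B =====
-- state (s, run, prev); the loop body of Source B
def pvStep (st : Int × Int × Int) (x : Int) : Int × Int × Int :=
  if 0 < st.2.1 ∧ x = st.2.2 then (st.1, st.2.1 + 1, st.2.2)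
  else ((if 1 < st.2.1 then st.1 + st.2.1 else st.1), 1, x)

def calculate_alt (arr : List Int) (k : Int) : Int :=
  let t := (PySem.List.sorted arr (fun x => x) false).foldl pvStep (k, 0, 0)
  if 1 < t.2.1 then t.1 + t.2.1 else t.1

-- ===== PRECONDITION & SPEC =====
def Spec_calculate (arr : List Int) (k : Int) (out : Int) : Prop := out = calculate_alt arr k
instance (arr : List Int) (k : Int) (out : Int) : Decidable (Spec_calculate arr k out) := by unfold Spec_calculate; infer_instance

-- ===== CLAIM (what is proved, stated in full; the proofs are below) =====
def Claim_equal_calculate : Prop := ∀ (arr : List Int) (k : Int), Dom_calculate arr k → Spec_calculate arr k (calculate arr k)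

-- ===== LEMMAS AND PROOFS =====

def pvFin (t : Int × Int × Int) : Int := if 1 < t.2.1 then t.1 + t.2.1 else t.1

-- sum of the multiplicities of the elements satisfying p, once per distinct element,
-- equals the number of elements satisfying p
theorem pv_sum_count (arr : List Int) (p : Int → Bool) :
    ∑ a ∈ arr.toFinset, (if p a then arr.count a else 0) = arr.countP p := by
  have h1 : ∀ a, (if p a then arr.count a else 0) = (arr.filter p).count a := by
    intro a; by_cases h : p a
    · simp [List.count_filter, h]
    · simp only [h, Bool.false_eq_true, if_false]
      exact (List.count_eq_zero.mpr (by simp [List.mem_filter, h])).symm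
  simp only [h1]
  rw [List.countP_eq_length_filter, ← List.sum_toFinset_count_eq_length (arr.filter p)]
  have hsub : (arr.filter p).toFinset ⊆ arr.toFinset := by
    intro a ha; simp only [List.mem_toFinset, List.mem_filter] at *; exact ha.1
  rw [Finset.sum_subset hsub]
  intro a _ ha
  simp only [List.mem_toFinset] at ha
  exact List.count_eq_zero.mpr ha

-- A's first loop builds exactly Counter(arr)
theorem pv_loopA_counter (arr : List Int) :
    (PySem.List.pyRange 0 arr.length 1).foldl
      (fun (c : PySem.Dict Int Int) i =>
        if c.contains (PySem.List.pyGetD arr i 0) = false then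
          c.insert (PySem.List.pyGetD arr i 0) 1
        else c.modify (PySem.List.pyGetD arr i 0) 0 (· + 1))
      PySem.Dict.empty = PySem.Dict.counter arr := by
  rw [PySem.List.foldl_pyRange_zero_pyGetD'
        (f := fun (c : PySem.Dict Int Int) x =>
          if c.contains x = false then c.insert x 1 else c.modify x 0 (· + 1))]
  rw [PySem.Dict.counter_eq_foldl]
  apply PySem.List.foldl_congr_mem'
  intro x _ c
  by_cases h : c.contains x
  · simp [h]
  · simp [h, PySem.Dict.modify, PySem.Dict.getD_of_not_contains (h := Bool.not_eq_true _ ▸ h)]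

-- a run of m copies of the current prev only increments run
theorem pv_run_fold (m : Nat) (s r y : Int) (hr : 1 ≤ r) :
    (List.replicate m y).foldl pvStep (s, r, y) = (s, r + m, y) := by
  induction m generalizing r with
  | zero => simp
  | succ m ih =>
    rw [List.replicate_succ, List.foldl_cons]
    have : pvStep (s, r, y) y = (s, r + 1, y) := by
      simp [pvStep]; omega
    rw [this, ih (r + 1) (by omega)]
    refine Prod.ext rfl (Prod.ext ?_ rfl)
    simp; omega

-- the elements strictly beyond the leading equal run of a sorted list are strictly larger
theorem pv_drop_gt (y : Int) (t : List Int) (hs : (y :: t).Pairwise (· ≤ ·)) :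
    ∀ z ∈ t.dropWhile (fun w => w == y), y < z := by
  have hle : ∀ z ∈ t, y ≤ z := (List.pairwise_cons.mp hs).1
  have hpd : (t.dropWhile (fun w => w == y)).Pairwise (· ≤ ·) :=
    ((List.pairwise_cons.mp hs).2).sublist (List.dropWhile_sublist _)
  cases hd : t.dropWhile (fun w => w == y) with
  | nil => intro z hz; simp at hz
  | cons w d' =>
    have hw : ¬ (w == y) = true := by
      have := List.head?_dropWhile_not (fun w => w == y) t
      rw [hd] at this; simpa using this
    have hwm : w ∈ t := (List.dropWhile_sublist _).subset (by rw [hd]; simp)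
    have hwy : y < w := lt_of_le_of_ne (hle w hwm) (by simpa using fun h => hw (by simp [h]))
    intro z hz
    rcases List.mem_cons.mp hz with h | h
    · exact h ▸ hwy
    · exact lt_of_lt_of_le hwy ((List.pairwise_cons.mp (hd ▸ hpd)).1 z h)

-- main invariant of B's scan: starting mid-scan with run r ≥ 1 on prev x, all remaining
-- elements strictly greater than x, the flushed result adds the duplicated multiplicities
theorem pv_scan (n : Nat) : ∀ (l : List Int), l.length ≤ n → l.Pairwise (· ≤ ·) →
    ∀ (s r x : Int), 1 ≤ r → (∀ y ∈ l, x < y) →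
    pvFin (l.foldl pvStep (s, r, x))
      = (if 1 < r then s + r else s) + ((l.countP (fun z => 1 < l.count z) : Nat) : Int) := by
  induction n with
  | zero =>
    intro l hl _ s r x _ _
    have : l = [] := List.length_eq_zero_iff.mp (Nat.le_zero.mp hl)
    subst this; simp [pvFin]
  | succ n ih =>
    intro l hl hsort s r x hr hx
    cases l with
    | nil => simp [pvFin]
    | cons y t =>
      have hxy : x < y := hx y (by simp)
      have hstep : pvStep (s, r, x) y = ((if 1 < r then s + r else s), 1, y) := by
        simp only [pvStep]
        rw [if_neg (by rintro ⟨_, h⟩; omega)]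
      set tw := t.takeWhile (fun w => w == y) with htw
      set d := t.dropWhile (fun w => w == y) with hdd
      set m := tw.length with hm
      have htsplit : t = tw ++ d := (List.takeWhile_append_dropWhile).symm
      have htwrep : tw = List.replicate m y := by
        apply List.eq_replicate_of_mem
        intro b hb
        have := List.mem_takeWhile_imp (htw ▸ hb)
        simpa using this
      have hdgt : ∀ z ∈ d, y < z := pv_drop_gt y t hsort
      have hynd : y ∉ d := fun h => lt_irrefl y (hdgt y h)
      have hdsort : d.Pairwise (· ≤ ·) :=
        ((List.pairwise_cons.mp hsort).2).sublist (List.dropWhile_sublist _)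
      have hdlen : d.length ≤ n := by
        have h1 : t.length ≤ n := by simpa using hl
        have h2 : d.length ≤ t.length := (List.dropWhile_sublist _).length_le
        omega
      -- run the fold through the head and the leading run
      rw [List.foldl_cons, hstep, htsplit, List.foldl_append, htwrep,
          pv_run_fold m _ 1 y le_rfl]
      rw [ih d hdlen hdsort _ (1 + m) y (by omega) hdgt]
      rw [show y :: (List.replicate m y ++ d) = List.replicate (m + 1) y ++ d by
            simp [List.replicate_succ]]
      have hcounty : (List.replicate (m + 1) y ++ d).count y = m + 1 := by
        rw [List.count_append, List.count_replicate]
        simp [List.count_eq_zero.mpr hynd]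
      have hcp : (List.replicate (m + 1) y ++ d).countP
            (fun z => decide (1 < (List.replicate (m + 1) y ++ d).count z))
          = (if 1 < m + 1 then m + 1 else 0)
            + d.countP (fun z => decide (1 < d.count z)) := by
        rw [List.countP_append]
        congr 1
        · rw [List.countP_replicate, hcounty]
          by_cases h : 1 < m + 1 <;> simp [h]
        · apply List.countP_congr
          intro z hz
          have hc : (List.replicate (m + 1) y ++ d).count z = d.count z := by
            rw [List.count_append, List.count_replicate,
                if_neg (by intro h; have := hdgt z hz; simp at h; omega)]
            simp
          rw [hc]
      rw [hcp]
      push_cast [Nat.cast_ite]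
      split_ifs <;> omega

-- ===== VERDICT (by name: the statement is the Claim_ definition above) =====
theorem calculate_spec : Claim_equal_calculate := by
  intro arr k _
  unfold Spec_calculate calculate calculate_alt
  simp only [pv_loopA_counter, PySem.Dict.keys_counter, PySem.Dict.getD_counter]
  set p : Int → Bool := fun x => decide ((arr.count x : Int) > 1) with hp
  -- A's second loop sums the duplicated multiplicities over the distinct elements
  have hA : (PySem.Set.ofList arr).foldl
      (fun s x => if ((arr.count x : Int)) > 1 then s + (arr.count x : Int) else s) k
      = k + ((arr.countP p : Nat) : Int) := by
    have hbody : ∀ (s x : Int),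
        (if ((arr.count x : Int)) > 1 then s + (arr.count x : Int) else s)
          = s + (if p x then ((arr.count x : Int)) else 0) := by
      intro s x; by_cases h : ((arr.count x : Int)) > 1
      · have hpx : p x = true := by rw [hp]; exact decide_eq_true h
        rw [if_pos h, hpx, if_pos rfl]
      · have hpx : p x = false := by rw [hp]; exact decide_eq_false h
        rw [if_neg h, hpx, if_neg (by simp)]; simp
    calc (PySem.Set.ofList arr).foldl
          (fun s x => if ((arr.count x : Int)) > 1 then s + (arr.count x : Int) else s) k
        = (PySem.Set.ofList arr).foldl
          (fun s x => s + (if p x then ((arr.count x : Int)) else 0)) k := by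
          apply PySem.List.foldl_congr_mem'; intro x _ s; exact hbody s x
      _ = k + ((PySem.Set.ofList arr).map (fun x => if p x then ((arr.count x : Int)) else 0)).sum := by
          rw [PySem.List.foldl_add]
      _ = k + ∑ a ∈ (PySem.Set.ofList arr).toFinset, (if p a then ((arr.count a : Int)) else 0) := by
          rw [List.sum_toFinset _ (PySem.Set.nodup_ofList arr)]
      _ = k + ∑ a ∈ arr.toFinset, (if p a then ((arr.count a : Int)) else 0) := by
          congr 1
          apply Finset.sum_congr _ (fun _ _ => rfl)
          ext a; simp [List.mem_toFinset, PySem.Set.mem_ofList]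
      _ = k + ((arr.countP p : Nat) : Int) := by
          rw [← pv_sum_count arr p]
          congr 1
          rw [Nat.cast_sum]
          apply Finset.sum_congr rfl
          intro a _; by_cases h : p a <;> simp [h]
  rw [hA]
  -- B's scan over the sorted copy sums the same multiplicities
  set l : List Int := PySem.List.sorted arr (fun x => x) false with hls
  have hperm : l.Perm arr := PySem.List.sorted_perm arr (fun x => x) false
  have hsort : l.Pairwise (· ≤ ·) := by
    have := PySem.List.sorted_pairwise arr (fun x => x)
    simpa using this
  have hcnt : l.countP (fun z => decide (1 < l.count z)) = arr.countP p := by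
    calc l.countP (fun z => decide (1 < l.count z))
        = l.countP (fun z => decide (1 < arr.count z)) := by
          apply List.countP_congr; intro z _
          rw [List.Perm.count_eq hperm]
      _ = arr.countP (fun z => decide (1 < arr.count z)) := List.Perm.countP_eq _ hperm
      _ = arr.countP p := by
          apply List.countP_congr; intro z _
          rw [hp]; simp
  cases hl : l with
  | nil =>
    have harr : arr = [] := (List.Perm.nil_eq (hl ▸ hperm)).symm
    simp [harr]
  | cons y t =>
    have hstep0 : pvStep (k, 0, 0) y = (k, 1, y) := by
      simp [pvStep]
    have hstep1 : pvStep (k, 1, y - 1) y = (k, 1, y) := by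
      simp only [pvStep]
      rw [if_neg (by rintro ⟨_, h⟩; omega)]
      norm_num
    have hgt : ∀ z ∈ y :: t, y - 1 < z := by
      intro z hz
      rcases List.mem_cons.mp hz with h | h
      · omega
      · have := (List.pairwise_cons.mp (hl ▸ hsort)).1 z h; omega
    have := pv_scan (y :: t).length (y :: t) le_rfl (hl ▸ hsort) k 1 (y - 1) le_rfl hgt
    rw [List.foldl_cons, hstep1] at this
    have hfin : ∀ u : Int × Int × Int, (if 1 < u.2.1 then u.1 + u.2.1 else u.1) = pvFin u :=
      fun _ => rfl
    rw [hfin, List.foldl_cons, hstep0, this, ← hl, hcnt]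
    norm_num
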